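-- pv_equiv track=rewrite | github.com/pkalliok/csv-quality-checker | check_csv.py | read_quality_data
-- ===== SOURCE A (Python) =====
-- def read_quality_data(reader):
--     line_count, line_lens, value_distr, value_len_distr = 0, {}, {}, {}
--     for row in reader:
--         line_count += 1
--         line_lens.setdefault(len(row), []).append(line_count)
--         for field in range(len(row)):
--             value_distr.setdefault(field,
--                     {}).setdefault(row[field], []).append(line_count)
--             value_len_distr.setdefault(field,
--                     {}).setdefault(len(row[field]), []).append(line_count)
--     return (line_count, line_lens, value_distr, value_len_distr)
-- ===== SOURCE B (Python) =====
-- def read_quality_data(reader):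
--     # Column-major re-implementation: one pass for line stats, then per-column
--     # passes over the materialized rows building each column's dicts.
--     rows = list(reader)
--     line_lens = {}
--     for i, row in enumerate(rows, 1):
--         line_lens.setdefault(len(row), []).append(i)
--     maxlen = 0
--     for row in rows:
--         if len(row) > maxlen:
--             maxlen = len(row)
--     value_distr, value_len_distr = {}, {}
--     for field in range(maxlen):
--         vd, vld = {}, {}
--         for i, row in enumerate(rows, 1):
--             if field < len(row):
--                 v = row[field]
--                 vd.setdefault(v, []).append(i)
--                 vld.setdefault(len(v), []).append(i)
--         value_distr[field] = vd
--         value_len_distr[field] = vld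
--     return (len(rows), line_lens, value_distr, value_len_distr)
-- ===== Notes on version B (the rewrite author's own statement) =====
-- stated objective: alternative
-- what changed: Replaces A's single row-major pass that interleaves all four accumulations with a column-major decomposition: one pass computes line count and line-length groups, then each column index from 0 to the max row length is processed by its own pass over the materialized rows, building that column's value and value-length dicts independently.
import Mathlib
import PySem

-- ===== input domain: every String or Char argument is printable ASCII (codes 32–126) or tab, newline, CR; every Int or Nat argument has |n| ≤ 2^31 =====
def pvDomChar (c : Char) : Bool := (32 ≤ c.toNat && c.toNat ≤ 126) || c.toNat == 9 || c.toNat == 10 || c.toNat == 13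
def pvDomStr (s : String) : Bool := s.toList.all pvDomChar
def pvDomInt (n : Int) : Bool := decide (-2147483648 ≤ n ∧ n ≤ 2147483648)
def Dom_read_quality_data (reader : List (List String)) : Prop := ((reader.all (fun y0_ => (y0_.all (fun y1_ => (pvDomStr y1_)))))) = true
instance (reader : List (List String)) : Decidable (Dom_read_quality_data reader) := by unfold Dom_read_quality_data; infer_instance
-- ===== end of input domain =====

-- B replaces A's single row-major pass with a column-major decomposition (one pass for
-- line stats, then an independent pass over the rows per column index); same cost class.

-- ===== PORT A =====
-- Literal transliteration of A: one fold over the rows threading all four accumulators;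
-- the inner 'for field in range(len(row))' is a fold over pyRange; dict.setdefault(k,⬝).append
-- is Dict.modify k dflt (· ++ [line]); row[field] is always in range, so pyGetD is exact.
def read_quality_data (reader : List (List String)) : Int × (List (Int × List Int)) × (List (Int × List (String × List Int))) × (List (Int × List (Int × List Int))) :=
  let s := reader.foldl
    (fun (s : Int × PySem.Dict Int (List Int) × PySem.Dict Int (PySem.Dict String (List Int)) × PySem.Dict Int (PySem.Dict Int (List Int))) row =>
      let lc := s.1 + 1
      let ll := s.2.1.modify (row.length : Int) [] (· ++ [lc])
      let p := (PySem.List.pyRange 0 (row.length : Int) 1).foldl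
        (fun (p : PySem.Dict Int (PySem.Dict String (List Int)) × PySem.Dict Int (PySem.Dict Int (List Int))) field =>
          let v := PySem.List.pyGetD row field ""
          (p.1.modify field PySem.Dict.empty (fun inn => inn.modify v [] (· ++ [lc])),
           p.2.modify field PySem.Dict.empty (fun inn => inn.modify (PySem.Str.len v) [] (· ++ [lc]))))
        (s.2.2.1, s.2.2.2)
      (lc, ll, p.1, p.2))
    ((0 : Int), PySem.Dict.empty, PySem.Dict.empty, PySem.Dict.empty)
  (s.1, s.2.1.items, s.2.2.1.items.map (fun q => (q.1, q.2.items)), s.2.2.2.items.map (fun q => (q.1, q.2.items)))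

-- ===== PORT B =====
-- B's per-column pass: both dicts of one column built by a single pass over the
-- enumerated rows (1-based), skipping rows too short to have this column.
def pvColPair (rows : List (List String)) (field : Int) :
    PySem.Dict String (List Int) × PySem.Dict Int (List Int) :=
  (PySem.List.enumerate rows 1).foldl
    (fun p q =>
      if field < (q.2.length : Int) then
        let v := PySem.List.pyGetD q.2 field ""
        (p.1.modify v [] (· ++ [q.1]), p.2.modify (PySem.Str.len v) [] (· ++ [q.1]))
      else p)
    (PySem.Dict.empty, PySem.Dict.empty)

-- Literal transliteration of B (Source B): line-length pass, max-length pass, then a fold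
-- over the column indices inserting each column's freshly built pair of dicts.
def read_quality_data_alt (reader : List (List String)) : Int × (List (Int × List Int)) × (List (Int × List (String × List Int))) × (List (Int × List (Int × List Int))) :=
  let rows := reader
  let ll := (PySem.List.enumerate rows 1).foldl
    (fun d q => d.modify (q.2.length : Int) [] (· ++ [q.1])) PySem.Dict.empty
  let maxlen := rows.foldl (fun m r => if (r.length : Int) > m then (r.length : Int) else m) (0 : Int)
  let p := (PySem.List.pyRange 0 maxlen 1).foldl
    (fun (p : PySem.Dict Int (PySem.Dict String (List Int)) × PySem.Dict Int (PySem.Dict Int (List Int))) f =>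
      let c := pvColPair rows f
      (p.1.insert f c.1, p.2.insert f c.2))
    (PySem.Dict.empty, PySem.Dict.empty)
  ((rows.length : Int), ll.items, p.1.items.map (fun q => (q.1, q.2.items)), p.2.items.map (fun q => (q.1, q.2.items)))

-- ===== PRECONDITION & SPEC =====
def Spec_read_quality_data (reader : List (List String)) (out : Int × (List (Int × List Int)) × (List (Int × List (String × List Int))) × (List (Int × List (Int × List Int)))) : Prop := out = read_quality_data_alt reader
instance (reader : List (List String)) (out : Int × (List (Int × List Int)) × (List (Int × List (String × List Int))) × (List (Int × List (Int × List Int)))) : Decidable (Spec_read_quality_data reader out) := by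
  unfold Spec_read_quality_data
  haveI h2 : DecidableEq (List (Int × List Int)) := by infer_instance
  haveI h3 : DecidableEq (List (Int × List (String × List Int))) := by infer_instance
  haveI h4 : DecidableEq (List (Int × List (Int × List Int))) := by infer_instance
  infer_instance

-- ===== CLAIM (what is proved, stated in full; the proofs are below) =====
def Claim_equal_read_quality_data : Prop := ∀ (reader : List (List String)), Dom_read_quality_data reader → Spec_read_quality_data reader (read_quality_data reader)

-- ===== LEMMAS AND PROOFS =====

-- Proof-side names for the two ports' loop states.
def pvSt : Type := Int × PySem.Dict Int (List Int) × PySem.Dict Int (PySem.Dict String (List Int)) × PySem.Dict Int (PySem.Dict Int (List Int))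

def pvAStep (s : pvSt) (row : List String) : pvSt :=
  let lc := s.1 + 1
  let ll := s.2.1.modify (row.length : Int) [] (· ++ [lc])
  let p := (PySem.List.pyRange 0 (row.length : Int) 1).foldl
    (fun (p : PySem.Dict Int (PySem.Dict String (List Int)) × PySem.Dict Int (PySem.Dict Int (List Int))) field =>
      let v := PySem.List.pyGetD row field ""
      (p.1.modify field PySem.Dict.empty (fun inn => inn.modify v [] (· ++ [lc])),
       p.2.modify field PySem.Dict.empty (fun inn => inn.modify (PySem.Str.len v) [] (· ++ [lc]))))
    (s.2.2.1, s.2.2.2)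
  (lc, ll, p.1, p.2)

def pvAState (reader : List (List String)) : pvSt :=
  reader.foldl pvAStep ((0 : Int), PySem.Dict.empty, PySem.Dict.empty, PySem.Dict.empty)

def pvPack (s : pvSt) : Int × (List (Int × List Int)) × (List (Int × List (String × List Int))) × (List (Int × List (Int × List Int))) :=
  (s.1, s.2.1.items, s.2.2.1.items.map (fun q => (q.1, q.2.items)), s.2.2.2.items.map (fun q => (q.1, q.2.items)))

def pvLL (rows : List (List String)) : PySem.Dict Int (List Int) :=
  (PySem.List.enumerate rows 1).foldl
    (fun d q => d.modify (q.2.length : Int) [] (· ++ [q.1])) PySem.Dict.empty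

def pvMaxLen (rows : List (List String)) : Int :=
  rows.foldl (fun m r => if (r.length : Int) > m then (r.length : Int) else m) (0 : Int)

def pvBState (rows : List (List String)) : pvSt :=
  ((rows.length : Int), pvLL rows,
   PySem.Dict.mk ((PySem.List.pyRange 0 (pvMaxLen rows) 1).map (fun f => (f, (pvColPair rows f).1))),
   PySem.Dict.mk ((PySem.List.pyRange 0 (pvMaxLen rows) 1).map (fun f => (f, (pvColPair rows f).2))))

theorem pvA_eq (reader : List (List String)) : read_quality_data reader = pvPack (pvAState reader) := rfl

theorem pvFoldl_le (rows : List (List String)) (m : Int) :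
    m ≤ rows.foldl (fun m r => if (r.length : Int) > m then (r.length : Int) else m) m := by
  induction rows generalizing m with
  | nil => simp
  | cons a t ih =>
      refine le_trans ?_ (ih (if (a.length : Int) > m then (a.length : Int) else m))
      split <;> omega

theorem pvB_eq (reader : List (List String)) : read_quality_data_alt reader = pvPack (pvBState reader) := by
  have h1 := PySem.Dict.items_foldl_insert_fresh (PySem.List.pyRange 0 (pvMaxLen reader) 1)
    (fun x => x) (fun f => (pvColPair reader f).1) PySem.Dict.empty
    (by intro a _; simp) (by simpa using PySem.List.nodup_pyRange_one 0 (pvMaxLen reader))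
  have h2 := PySem.Dict.items_foldl_insert_fresh (PySem.List.pyRange 0 (pvMaxLen reader) 1)
    (fun x => x) (fun f => (pvColPair reader f).2) PySem.Dict.empty
    (by intro a _; simp) (by simpa using PySem.List.nodup_pyRange_one 0 (pvMaxLen reader))
  have hsplit : (List.foldl
      (fun (p : PySem.Dict Int (PySem.Dict String (List Int)) × PySem.Dict Int (PySem.Dict Int (List Int))) f =>
        (p.1.insert f (pvColPair reader f).1, p.2.insert f (pvColPair reader f).2))
      (PySem.Dict.empty, PySem.Dict.empty) (PySem.List.pyRange 0 (pvMaxLen reader) 1))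
      = (List.foldl (fun d f => d.insert f (pvColPair reader f).1) PySem.Dict.empty
          (PySem.List.pyRange 0 (pvMaxLen reader) 1),
         List.foldl (fun d f => d.insert f (pvColPair reader f).2) PySem.Dict.empty
          (PySem.List.pyRange 0 (pvMaxLen reader) 1)) :=
    PySem.List.foldl_prod_mk
      (fun (d : PySem.Dict Int (PySem.Dict String (List Int))) (f : Int) => d.insert f (pvColPair reader f).1)
      (fun (d : PySem.Dict Int (PySem.Dict Int (List Int))) (f : Int) => d.insert f (pvColPair reader f).2) _ _ _
  simp only [read_quality_data_alt, pvPack, pvBState, pvLL, pvMaxLen]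
  simp only [pvMaxLen] at hsplit h1 h2
  rw [hsplit]
  have ha := PySem.Dict.ext h1
  have hb := PySem.Dict.ext h2
  simp only [PySem.Dict.empty] at ha hb ⊢
  rw [ha, hb]
  simp

-- modify is insert of the updated value (definitional)
theorem pvModify_eq {κ ν : Type} [BEq κ] (d : PySem.Dict κ ν) (k : κ) (d0 : ν) (f : ν → ν) :
    d.modify k d0 f = d.insert k (f (d.getD k d0)) := rfl

theorem pvEnumerate_append {α : Type} (xs : List α) (x : α) (s : Int) :
    PySem.List.enumerate (xs ++ [x]) s = PySem.List.enumerate xs s ++ [(s + xs.length, x)] := by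
  induction xs generalizing s with
  | nil => simp [PySem.List.enumerate]
  | cons a t ih => simp [PySem.List.enumerate, ih]; ring_nf

theorem pvMaxLen_append (rows : List (List String)) (row : List String) :
    pvMaxLen (rows ++ [row]) =
      if (row.length : Int) > pvMaxLen rows then (row.length : Int) else pvMaxLen rows := by
  simp [pvMaxLen, List.foldl_append]

theorem pvMaxLen_nonneg (rows : List (List String)) : 0 ≤ pvMaxLen rows :=
  pvFoldl_le rows 0

theorem pvFoldl_bound (rows : List (List String)) (r : List String) (h : r ∈ rows) :
    ∀ m : Int, (r.length : Int) ≤ rows.foldl (fun m r => if (r.length : Int) > m then (r.length : Int) else m) m := by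
  induction rows with
  | nil => cases h
  | cons a t ih =>
      intro m
      rcases List.mem_cons.mp h with rfl | hr
      · refine le_trans ?_ (pvFoldl_le t _)
        show (r.length : Int) ≤ if (r.length : Int) > m then (r.length : Int) else m
        split <;> omega
      · exact ih hr _

theorem pvMaxLen_bound (rows : List (List String)) (r : List String) (h : r ∈ rows) :
    (r.length : Int) ≤ pvMaxLen rows :=
  pvFoldl_bound rows r h 0

theorem pvLL_append (rows : List (List String)) (row : List String) :
    pvLL (rows ++ [row]) = (pvLL rows).modify (row.length : Int) [] (· ++ [(rows.length : Int) + 1]) := by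
  simp [pvLL, pvEnumerate_append, List.foldl_append]
  ring_nf

theorem pvColPair_append (rows : List (List String)) (row : List String) (f : Int) :
    pvColPair (rows ++ [row]) f =
      if f < (row.length : Int) then
        let v := PySem.List.pyGetD row f ""
        ((pvColPair rows f).1.modify v [] (· ++ [(rows.length : Int) + 1]),
         (pvColPair rows f).2.modify (PySem.Str.len v) [] (· ++ [(rows.length : Int) + 1]))
      else pvColPair rows f := by
  simp [pvColPair, pvEnumerate_append, List.foldl_append]
  ring_nf

theorem pvFoldl_id {α σ : Type} (l : List α) (step : σ → α → σ) (p : σ)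
    (h : ∀ q ∈ l, ∀ s, step s q = s) : l.foldl step p = p := by
  induction l generalizing p with
  | nil => rfl
  | cons a t ih =>
      rw [List.foldl_cons, h a (by simp)]
      exact ih p (fun q hq s => h q (by simp [hq]) s)

theorem pvColPair_empty (rows : List (List String)) (f : Int) (h : pvMaxLen rows ≤ f) :
    pvColPair rows f = (PySem.Dict.empty, PySem.Dict.empty) := by
  unfold pvColPair
  apply pvFoldl_id
  intro q hq s
  have hmem : q.2 ∈ rows := by
    have hmap := PySem.List.map_snd_enumerate rows (1 : Int)
    rw [← hmap]
    exact List.mem_map_of_mem hq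
  have hlen : (q.2.length : Int) ≤ pvMaxLen rows := pvMaxLen_bound rows q.2 hmem
  rw [if_neg (by omega)]

-- The heart of the proof: one A-row-step of the inner (per-field) fold, applied to a
-- column-indexed dict in B's normal form, yields B's normal form again.
theorem pvInnerFold {κ : Type} [BEq κ] [LawfulBEq κ] [DecidableEq κ]
    (m : Int) (hm : 0 ≤ m) (C : Int → PySem.Dict κ (List Int)) (val : Int → κ) (lc : Int) (L : Nat) :
    ((PySem.List.pyRange 0 (L : Int) 1).foldl
        (fun d f => d.modify f PySem.Dict.empty (fun inn => inn.modify (val f) [] (· ++ [lc])))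
        (PySem.Dict.mk ((PySem.List.pyRange 0 m 1).map (fun f => (f, C f)))))
    = PySem.Dict.mk ((PySem.List.pyRange 0 (max m (L : Int)) 1).map
        (fun f => (f, if f < (L : Int)
          then ((if f < m then C f else PySem.Dict.empty).modify (val f) [] (· ++ [lc]))
          else C f))) := by
  induction L with
  | zero =>
      simp only [Nat.cast_zero]
      rw [PySem.List.pyRange_one_eq_nil (le_refl 0)]
      simp only [List.foldl_nil]
      rw [max_eq_left hm]
      refine congrArg PySem.Dict.mk ?_
      apply List.map_congr_left
      intro f hf
      have h0 : 0 ≤ f := (PySem.List.mem_pyRange_one.mp hf).1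
      rw [if_neg (by omega)]
  | succ L ih =>
      have hL0 : (0 : Int) ≤ (L : Int) := by positivity
      have hcast : ((L + 1 : Nat) : Int) = (L : Int) + 1 := by push_cast; ring
      rw [hcast, PySem.List.pyRange_one_succ_right hL0, List.foldl_append, ih]
      simp only [List.foldl_cons, List.foldl_nil]
      set D := PySem.Dict.mk ((PySem.List.pyRange 0 (max m (L : Int)) 1).map
        (fun f => (f, if f < (L : Int)
          then ((if f < m then C f else PySem.Dict.empty).modify (val f) [] (· ++ [lc]))
          else C f))) with hD
      have hkeys : D.keys = PySem.List.pyRange 0 (max m (L : Int)) 1 := by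
        rw [hD, PySem.Dict.keys_mk, List.map_map]; simp [Function.comp_def]
      have hnd : D.keys.Nodup := by rw [hkeys]; exact PySem.List.nodup_pyRange_one 0 _
      rw [pvModify_eq D ((L : Int)) PySem.Dict.empty]
      by_cases hLm : (L : Int) < m
      · have hmax1 : max m (L : Int) = m := by omega
        have hmax2 : max m ((L : Int) + 1) = m := by omega
        have hmemL : ((L : Int)) ∈ D.keys := by
          rw [hkeys]; exact PySem.List.mem_pyRange_one.mpr ⟨hL0, by omega⟩
        have hcont : D.contains ((L : Int)) = true := by
          rw [PySem.Dict.contains_eq_decide_mem_keys]; simpa using hmemL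
        have hpair : ((L : Int), C (L : Int)) ∈ D.items := by
          rw [hD]
          have hmem' : ((L : Int)) ∈ PySem.List.pyRange 0 (max m (L : Int)) 1 := by
            exact PySem.List.mem_pyRange_one.mpr ⟨hL0, by omega⟩
          have := List.mem_map_of_mem (f := (fun f => (f, if f < (L : Int)
            then ((if f < m then C f else PySem.Dict.empty).modify (val f) [] (· ++ [lc]))
            else C f))) hmem'
          simpa using this
        have hgetD : D.getD ((L : Int)) PySem.Dict.empty = C (L : Int) :=
          PySem.Dict.getD_of_mem_items D hpair hnd _
        apply PySem.Dict.ext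
        rw [PySem.Dict.items_insert_of_contains D _ hcont]
        simp only [hgetD]
        simp only [hmax2, hD, hmax1, List.map_map]
        apply List.map_congr_left
        intro f hf
        obtain ⟨hf0, hfm⟩ := PySem.List.mem_pyRange_one.mp hf
        simp only [Function.comp_apply]
        by_cases hfL : f = (L : Int)
        · subst hfL
          simp [hLm, show ((L : Int)) < (L : Int) + 1 from by omega]
        · have hne : (f == (L : Int)) = false := by simp [hfL]
          simp only [hne, Bool.false_eq_true, if_false]
          by_cases hflt : f < (L : Int)
          · rw [if_pos hflt, if_pos (show f < (L : Int) + 1 from by omega)]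
          · rw [if_neg hflt, if_neg (show ¬ f < (L : Int) + 1 from by omega)]
      · have hmax1 : max m (L : Int) = (L : Int) := by omega
        have hmax2 : max m ((L : Int) + 1) = (L : Int) + 1 := by omega
        have hcont : D.contains ((L : Int)) = false := by
          rw [PySem.Dict.contains_eq_decide_mem_keys, hkeys]
          simp only [decide_eq_false_iff_not, PySem.List.mem_pyRange_one]
          omega
        have hgetD := PySem.Dict.getD_of_not_contains D PySem.Dict.empty hcont
        apply PySem.Dict.ext
        rw [PySem.Dict.items_insert_of_not_contains D _ hcont]
        simp only [hgetD]
        simp only [hmax2, hD, hmax1]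
        rw [PySem.List.pyRange_one_succ_right hL0, List.map_append]
        congr 1
        · apply List.map_congr_left
          intro f hf
          obtain ⟨hf0, hfL⟩ := PySem.List.mem_pyRange_one.mp hf
          rw [if_pos hfL, if_pos (show f < (L : Int) + 1 from by omega)]
        · simp only [List.map_cons, List.map_nil]
          rw [if_pos (show (L : Int) < (L : Int) + 1 from by omega), if_neg (show ¬ (L : Int) < m from by omega)]

theorem pvStep (rows : List (List String)) (row : List String) :
    pvAStep (pvBState rows) row = pvBState (rows ++ [row]) := by
  have hm := pvMaxLen_nonneg rows
  have hmax : pvMaxLen (rows ++ [row]) = max (pvMaxLen rows) (row.length : Int) := by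
    rw [pvMaxLen_append]; split <;> omega
  have hlen : ((rows ++ [row]).length : Int) = (rows.length : Int) + 1 := by
    push_cast [List.length_append, List.length_singleton]; ring
  have hvd := pvInnerFold (pvMaxLen rows) hm (fun f => (pvColPair rows f).1)
    (fun f => PySem.List.pyGetD row f "") ((rows.length : Int) + 1) row.length
  have hvld := pvInnerFold (pvMaxLen rows) hm (fun f => (pvColPair rows f).2)
    (fun f => PySem.Str.len (PySem.List.pyGetD row f "")) ((rows.length : Int) + 1) row.length
  have hcol1 : ∀ f ∈ PySem.List.pyRange 0 (max (pvMaxLen rows) (row.length : Int)) 1,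
      (f, if f < ((row.length : Nat) : Int)
        then ((if f < pvMaxLen rows then (pvColPair rows f).1 else PySem.Dict.empty).modify
          (PySem.List.pyGetD row f "") [] (· ++ [(rows.length : Int) + 1]))
        else (pvColPair rows f).1)
      = (f, (pvColPair (rows ++ [row]) f).1) := by
    intro f _
    rw [pvColPair_append]
    by_cases hfL : f < (row.length : Int)
    · rw [if_pos hfL, if_pos hfL]
      by_cases hfm : f < pvMaxLen rows
      · rw [if_pos hfm]
      · rw [if_neg hfm, pvColPair_empty rows f (by omega)]
    · rw [if_neg hfL, if_neg hfL]
  have hcol2 : ∀ f ∈ PySem.List.pyRange 0 (max (pvMaxLen rows) (row.length : Int)) 1,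
      (f, if f < ((row.length : Nat) : Int)
        then ((if f < pvMaxLen rows then (pvColPair rows f).2 else PySem.Dict.empty).modify
          (PySem.Str.len (PySem.List.pyGetD row f "")) [] (· ++ [(rows.length : Int) + 1]))
        else (pvColPair rows f).2)
      = (f, (pvColPair (rows ++ [row]) f).2) := by
    intro f _
    rw [pvColPair_append]
    by_cases hfL : f < (row.length : Int)
    · rw [if_pos hfL, if_pos hfL]
      by_cases hfm : f < pvMaxLen rows
      · rw [if_pos hfm]
      · rw [if_neg hfm, pvColPair_empty rows f (by omega)]
    · rw [if_neg hfL, if_neg hfL]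
  have hsplit : (List.foldl
      (fun (p : PySem.Dict Int (PySem.Dict String (List Int)) × PySem.Dict Int (PySem.Dict Int (List Int))) field =>
        (p.1.modify field PySem.Dict.empty
          (fun inn => inn.modify (PySem.List.pyGetD row field "") [] (· ++ [(rows.length : Int) + 1])),
         p.2.modify field PySem.Dict.empty
          (fun inn => inn.modify (PySem.Str.len (PySem.List.pyGetD row field "")) [] (· ++ [(rows.length : Int) + 1]))))
      (PySem.Dict.mk ((PySem.List.pyRange 0 (pvMaxLen rows) 1).map (fun f => (f, (pvColPair rows f).1))),
       PySem.Dict.mk ((PySem.List.pyRange 0 (pvMaxLen rows) 1).map (fun f => (f, (pvColPair rows f).2))))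
      (PySem.List.pyRange 0 (row.length : Int) 1))
      = (List.foldl (fun d field => d.modify field PySem.Dict.empty
            (fun inn => inn.modify (PySem.List.pyGetD row field "") [] (· ++ [(rows.length : Int) + 1])))
          (PySem.Dict.mk ((PySem.List.pyRange 0 (pvMaxLen rows) 1).map (fun f => (f, (pvColPair rows f).1))))
          (PySem.List.pyRange 0 (row.length : Int) 1),
         List.foldl (fun d field => d.modify field PySem.Dict.empty
            (fun inn => inn.modify (PySem.Str.len (PySem.List.pyGetD row field "")) [] (· ++ [(rows.length : Int) + 1])))
          (PySem.Dict.mk ((PySem.List.pyRange 0 (pvMaxLen rows) 1).map (fun f => (f, (pvColPair rows f).2))))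
          (PySem.List.pyRange 0 (row.length : Int) 1)) :=
    PySem.List.foldl_prod_mk
      (fun (d : PySem.Dict Int (PySem.Dict String (List Int))) (field : Int) => d.modify field PySem.Dict.empty
        (fun inn => inn.modify (PySem.List.pyGetD row field "") [] (· ++ [(rows.length : Int) + 1])))
      (fun (d : PySem.Dict Int (PySem.Dict Int (List Int))) (field : Int) => d.modify field PySem.Dict.empty
        (fun inn => inn.modify (PySem.Str.len (PySem.List.pyGetD row field "")) [] (· ++ [(rows.length : Int) + 1])))
      _ _ _
  simp only [pvAStep, pvBState]
  rw [hsplit]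
  rw [hvd, hvld, List.map_congr_left hcol1, List.map_congr_left hcol2]
  rw [pvLL_append, hmax, hlen]

theorem pvStates_eq (reader : List (List String)) : pvAState reader = pvBState reader := by
  induction reader using List.reverseRecOn with
  | nil => rfl
  | append_singleton rs row ih =>
      have h : pvAState (rs ++ [row]) = pvAStep (pvAState rs) row := by
        simp [pvAState, List.foldl_append]
      rw [h, ih, pvStep]

-- ===== VERDICT (by name: the statement is the Claim_ definition above) =====
theorem read_quality_data_spec : Claim_equal_read_quality_data := by
  intro reader _
  show read_quality_data reader = read_quality_data_alt reader
  rw [pvA_eq, pvB_eq, pvStates_eq]
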